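-- pv_equiv track=rewrite | github.com/Jonathanseng/Combinatorics-Permutation | 21. Inclusion exclusion principle - Part3.py | inclusion_exclusion_part3
-- ===== SOURCE A (Python) =====
-- def inclusion_exclusion_part3(sets):
--   """
--   Returns the cardinality of the union of the given sets.
--
--   Args:
--     sets: A list of sets.
--
--   Returns:
--     The cardinality of the union of the given sets.
--   """
--
--   result = 0
--   for set in sets:
--     result += len(set)
--   for i in range(len(sets)):
--     for j in range(i + 1, len(sets)):
--       if sets[i] & sets[j]:
--         result -= 2 * len(sets[i] & sets[j])
--   return result
-- ===== SOURCE B (Python) =====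
-- def inclusion_exclusion_part3(sets):
--     counts = {}
--     for s in sets:
--         for x in s:
--             counts[x] = counts.get(x, 0) + 1
--     return sum(c * (2 - c) for c in counts.values())
-- ===== Notes on version B (the rewrite author's own statement) =====
-- stated objective: faster
-- what changed: Replaces the O(n^2) pairwise-intersection double loop by one pass counting how often each element occurs across the sets and summing c*(2-c) per distinct element (since sum_{i<j}|Si∩Sj| = sum_x C(c_x,2)).
import Mathlib
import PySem

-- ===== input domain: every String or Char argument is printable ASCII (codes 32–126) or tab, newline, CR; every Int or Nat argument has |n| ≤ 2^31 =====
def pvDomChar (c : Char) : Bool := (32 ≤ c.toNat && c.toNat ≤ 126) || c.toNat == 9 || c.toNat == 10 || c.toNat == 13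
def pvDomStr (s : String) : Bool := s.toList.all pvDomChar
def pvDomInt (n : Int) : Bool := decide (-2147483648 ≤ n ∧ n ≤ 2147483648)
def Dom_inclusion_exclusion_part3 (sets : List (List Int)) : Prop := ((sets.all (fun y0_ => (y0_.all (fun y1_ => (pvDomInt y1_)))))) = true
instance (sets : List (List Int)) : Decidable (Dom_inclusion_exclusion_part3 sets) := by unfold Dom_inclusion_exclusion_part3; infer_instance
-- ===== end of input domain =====

-- B replaces A's O(n^2) pairwise-intersection double loop by one counting pass over all
-- elements, summing c*(2-c) per distinct element (since Σ_{i<j}|Si∩Sj| = Σ_x C(c_x,2)).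

-- ===== PORT A =====
def inclusion_exclusion_part3 (sets : List (List Int)) : Int :=
  -- result = 0; for set in sets: result += len(set)
  let result : Int := sets.foldl (fun acc s => acc + (s.length : Int)) 0
  -- for i in range(len(sets)): for j in range(i+1, len(sets)): if sets[i] & sets[j]: result -= 2*len(sets[i] & sets[j])
  (PySem.List.pyRange 0 (sets.length : Int) 1).foldl (fun result i =>
    (PySem.List.pyRange (i + 1) (sets.length : Int) 1).foldl (fun result j =>
      if PySem.Set.inter (PySem.List.pyGetD sets i []) (PySem.List.pyGetD sets j []) ≠ [] then
        result - 2 * ((PySem.Set.inter (PySem.List.pyGetD sets i []) (PySem.List.pyGetD sets j [])).length : Int)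
      else result) result) result

-- ===== PORT B =====
def inclusion_exclusion_part3_alt (sets : List (List Int)) : Int :=
  -- counts = {}; for s in sets: for x in s: counts[x] = counts.get(x, 0) + 1
  let counts : PySem.Dict Int Int :=
    sets.foldl (fun d s => s.foldl (fun d x => d.insert x (d.getD x 0 + 1)) d) PySem.Dict.empty
  -- return sum(c * (2 - c) for c in counts.values())
  counts.values.foldl (fun acc c => acc + c * (2 - c)) 0

-- ===== PRECONDITION & SPEC =====
-- A's parameter is a list of Python SETS; Pre_ states that each inner list holds distinct
-- elements, which every genuine set value does — it excludes no input the Python A accepts.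
def Pre_inclusion_exclusion_part3 (sets : List (List Int)) : Prop := ∀ s ∈ sets, s.Nodup
instance (sets : List (List Int)) : Decidable (Pre_inclusion_exclusion_part3 sets) := by
  unfold Pre_inclusion_exclusion_part3; infer_instance

def pvWitness_inclusion_exclusion_part3 : List (List Int) := [[1, 2], [2, 3]]

def Spec_inclusion_exclusion_part3 (sets : List (List Int)) (out : Int) : Prop := out = inclusion_exclusion_part3_alt sets
instance (sets : List (List Int)) (out : Int) : Decidable (Spec_inclusion_exclusion_part3 sets out) := by unfold Spec_inclusion_exclusion_part3; infer_instance

-- ===== CLAIM (what is proved, stated in full; the proofs are below) =====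
def Claim_equal_inclusion_exclusion_part3 : Prop := ∀ (sets : List (List Int)), Dom_inclusion_exclusion_part3 sets → Pre_inclusion_exclusion_part3 sets → Spec_inclusion_exclusion_part3 sets (inclusion_exclusion_part3 sets)

-- ===== LEMMAS AND PROOFS =====

-- |s ∩ t| as A computes it
def ilen (a b : List Int) : Int := ((PySem.Set.inter a b).length : Int)

-- Σ_{i<j} |S_i ∩ S_j|, structurally
def pairSum : List (List Int) → Int
  | [] => 0
  | s :: rest => (rest.map (fun t => ilen s t)).sum + pairSum rest

lemma foldl_add_map {α : Type} (f : α → Int) (l : List α) (init : Int) :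
    l.foldl (fun acc s => acc + f s) init = init + (l.map f).sum := by
  induction l generalizing init with
  | nil => simp
  | cons s rest ih => simp [List.foldl_cons, ih]; ring

lemma inner_fold (s : List Int) (rest : List (List Int)) (init : Int) :
    rest.foldl (fun res t =>
        if PySem.Set.inter s t ≠ [] then res - 2 * ((PySem.Set.inter s t).length : Int) else res)
      init = init - 2 * (rest.map (fun t => ilen s t)).sum := by
  induction rest generalizing init with
  | nil => simp
  | cons t rest ih =>
    have hstep : (if PySem.Set.inter s t ≠ [] then init - 2 * ((PySem.Set.inter s t).length : Int) else init)
        = init - 2 * ilen s t := by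
      by_cases h : PySem.Set.inter s t = [] <;> simp [h, ilen]
    simp only [List.foldl_cons, hstep, ih, List.map_cons, List.sum_cons]
    ring

lemma outer_fold (sets : List (List Int)) :
    ∀ (m k : Nat), sets.length = k + m → ∀ (init : Int),
    (PySem.List.pyRange (k : Int) (sets.length : Int) 1).foldl (fun result i =>
      (PySem.List.pyRange (i + 1) (sets.length : Int) 1).foldl (fun result j =>
        if PySem.Set.inter (PySem.List.pyGetD sets i []) (PySem.List.pyGetD sets j []) ≠ [] then
          result - 2 * ((PySem.Set.inter (PySem.List.pyGetD sets i []) (PySem.List.pyGetD sets j [])).length : Int)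
        else result) result) init
    = init - 2 * pairSum (sets.drop k) := by
  intro m
  induction m with
  | zero =>
    intro k hk init
    rw [PySem.List.pyRange_one_eq_nil (by omega)]
    simp [List.drop_eq_nil_of_le (by omega : sets.length ≤ k), pairSum]
  | succ m ih =>
    intro k hk init
    have hklt : k < sets.length := by omega
    rw [PySem.List.pyRange_one_cons (by exact_mod_cast hklt)]
    rw [List.foldl_cons]
    have hget : PySem.List.pyGetD sets (k : Int) [] = sets[k] := by
      rw [PySem.List.pyGetD_natCast]; exact List.getD_eq_getElem _ _ hklt
    have hinner :
        (PySem.List.pyRange ((k : Int) + 1) (sets.length : Int) 1).foldl (fun result j =>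
          if PySem.Set.inter (PySem.List.pyGetD sets (k : Int) []) (PySem.List.pyGetD sets j []) ≠ [] then
            result - 2 * ((PySem.Set.inter (PySem.List.pyGetD sets (k : Int) []) (PySem.List.pyGetD sets j [])).length : Int)
          else result) init
        = init - 2 * ((sets.drop (k + 1)).map (fun t => ilen sets[k] t)).sum := by
      simp only [hget]
      rw [PySem.List.foldl_pyRange_pyGetD' sets []
        (fun res t =>
          if PySem.Set.inter sets[k] t ≠ [] then res - 2 * ((PySem.Set.inter sets[k] t).length : Int) else res)
        init (by positivity)]
      rw [show ((k : Int) + 1).toNat = k + 1 from by omega]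
      exact inner_fold _ _ _
    rw [show ((k : Int) + 1) = (((k + 1 : Nat)) : Int) by push_cast; ring]
    rw [ih (k + 1) (by omega) _]
    rw [show (((k + 1 : Nat)) : Int) = (k : Int) + 1 by push_cast; ring] at *
    rw [hinner]
    rw [List.drop_eq_getElem_cons hklt, pairSum]
    ring

lemma a_closed (sets : List (List Int)) :
    inclusion_exclusion_part3 sets
      = (sets.map (fun s => (s.length : Int))).sum - 2 * pairSum sets := by
  unfold inclusion_exclusion_part3
  rw [foldl_add_map, zero_add]
  have h := outer_fold sets sets.length 0 (by omega) ((sets.map (fun s => (s.length : Int))).sum)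
  simpa using h

lemma b_closed (sets : List (List Int)) :
    inclusion_exclusion_part3_alt sets
      = ((PySem.Set.ofList sets.flatten).map
          (fun x => ((sets.flatten.count x : Int)) * (2 - (sets.flatten.count x : Int)))).sum := by
  unfold inclusion_exclusion_part3_alt
  rw [← List.foldl_flatten, PySem.Dict.foldl_insert_getD_add_one_eq_counter]
  have hv : (PySem.Dict.counter sets.flatten).values
      = (PySem.Set.ofList sets.flatten).map (fun x => ((sets.flatten.count x : Int))) := by
    show (PySem.Dict.counter sets.flatten).items.map Prod.snd = _
    rw [PySem.Dict.items_counter, List.map_map]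
    rfl
  simp only [hv]
  rw [show (fun acc c => acc + c * (2 - c)) = (fun (acc : Int) c => acc + (fun y : Int => y * (2 - y)) c) from rfl]
  rw [foldl_add_map (fun y : Int => y * (2 - y)) _ 0, zero_add, List.map_map]
  rfl


lemma sum_extend (L : List Int) (T : Finset Int) (h : L.toFinset ⊆ T) :
    ∑ x ∈ L.toFinset, ((L.count x : Int) * (2 - (L.count x : Int)))
      = ∑ x ∈ T, ((L.count x : Int) * (2 - (L.count x : Int))) :=
  Finset.sum_subset h (fun x _ hx => by
    have h0 : L.count x = 0 := List.count_eq_zero.mpr (by simpa using hx)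
    simp [h0])

lemma ofList_sum_eq_finset (L : List Int) (f : Int → Int) :
    ((PySem.Set.ofList L).map f).sum = ∑ x ∈ L.toFinset, f x := by
  rw [← List.sum_toFinset f (PySem.Set.nodup_ofList L)]
  congr 1
  ext x
  simp [PySem.Set.mem_ofList]

lemma count_nodup (t : List Int) (ht : t.Nodup) (x : Int) :
    (t.count x : Int) = if x ∈ t then 1 else 0 := by
  by_cases hx : x ∈ t
  · simp [hx, List.count_eq_one_of_mem ht hx]
  · simp [hx, List.count_eq_zero.mpr hx]

lemma ilen_eq (s t : List Int) (ht : t.Nodup) :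
    (s.map (fun x => (t.count x : Int))).sum = ilen s t := by
  have h1 : (s.map (fun x => (t.count x : Int))).sum
      = (s.map (fun x => if t.contains x then (1 : Int) else 0)).sum := by
    congr 1
    refine List.map_congr_left (fun x _ => ?_)
    rw [count_nodup t ht x]
    simp
  rw [h1, PySem.List.sum_map_ite_one_zero (fun x => t.contains x) s]
  simp [ilen, PySem.Set.inter, List.countP_eq_length_filter]

lemma swap_sum (s : List Int) (rest : List (List Int)) :
    (s.map (fun x => (rest.map (fun t => (t.count x : Int))).sum)).sum
      = (rest.map (fun t => (s.map (fun x => (t.count x : Int))).sum)).sum := by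
  induction rest with
  | nil => simp
  | cons t rest ih =>
    simp only [List.map_cons, List.sum_cons, PySem.List.sum_map_add_int s
      (fun x => (t.count x : Int)) (fun x => (rest.map (fun u => (u.count x : Int))).sum), ih]

lemma inter_sum (s : List Int) (rest : List (List Int)) (hs : s.Nodup)
    (hrest : ∀ t ∈ rest, t.Nodup) :
    ∑ x ∈ s.toFinset, (rest.flatten.count x : Int) = (rest.map (fun t => ilen s t)).sum := by
  rw [List.sum_toFinset _ hs]
  have h1 : (s.map (fun x => (rest.flatten.count x : Int))).sum
      = (s.map (fun x => (rest.map (fun t => (t.count x : Int))).sum)).sum := by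
    congr 1
    refine List.map_congr_left (fun x _ => ?_)
    rw [List.count_flatten, Nat.cast_list_sum, List.map_map]
    rfl
  rw [h1, swap_sum]
  congr 1
  exact List.map_congr_left (fun t htmem => ilen_eq s t (hrest t htmem))

lemma step_sum (s : List Int) (Lr : List Int) (hs : s.Nodup) :
    ∑ x ∈ (s ++ Lr).toFinset, (((s ++ Lr).count x : Int) * (2 - ((s ++ Lr).count x : Int)))
      = ∑ x ∈ Lr.toFinset, ((Lr.count x : Int) * (2 - (Lr.count x : Int)))
        + ((s.length : Int) - 2 * ∑ x ∈ s.toFinset, (Lr.count x : Int)) := by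
  set T : Finset Int := (s ++ Lr).toFinset with hT
  have hsubL : Lr.toFinset ⊆ T := by rw [hT, List.toFinset_append]; exact Finset.subset_union_right
  have hsubS : s.toFinset ⊆ T := by rw [hT, List.toFinset_append]; exact Finset.subset_union_left
  rw [sum_extend Lr T hsubL]
  have hdiff : ∑ x ∈ T, (((s ++ Lr).count x : Int) * (2 - ((s ++ Lr).count x : Int)))
      - ∑ x ∈ T, ((Lr.count x : Int) * (2 - (Lr.count x : Int)))
      = ∑ x ∈ T, (if x ∈ s.toFinset then (1 - 2 * (Lr.count x : Int)) else 0) := by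
    rw [← Finset.sum_sub_distrib]
    refine Finset.sum_congr rfl (fun x _ => ?_)
    rw [List.count_append]
    by_cases hx : x ∈ s
    · have h1 : (s.count x : Int) = 1 := by rw [count_nodup s hs x]; simp [hx]
      have : ((s.count x + Lr.count x : Nat) : Int) = 1 + (Lr.count x : Int) := by
        push_cast; rw [h1]
      rw [this]
      simp only [List.mem_toFinset, hx, if_pos]
      ring
    · have h0 : (s.count x : Int) = 0 := by rw [count_nodup s hs x]; simp [hx]
      have : ((s.count x + Lr.count x : Nat) : Int) = (Lr.count x : Int) := by
        push_cast; rw [h0]; ring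
      rw [this]
      simp only [List.mem_toFinset, hx, if_neg, not_false_iff]
      ring
  have hinner : ∑ x ∈ T, (if x ∈ s.toFinset then (1 - 2 * (Lr.count x : Int)) else 0)
      = ∑ x ∈ s.toFinset, (1 - 2 * (Lr.count x : Int)) := by
    rw [Finset.sum_ite_mem, Finset.inter_eq_right.mpr hsubS]
  have hcard : ∑ x ∈ s.toFinset, ((1 : Int) - 2 * (Lr.count x : Int))
      = (s.length : Int) - 2 * ∑ x ∈ s.toFinset, (Lr.count x : Int) := by
    rw [Finset.sum_sub_distrib, Finset.sum_const, List.toFinset_card_of_nodup hs,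
      ← Finset.mul_sum]
    simp
  have := hdiff.trans (hinner.trans hcard)
  linarith [this]

lemma core (sets : List (List Int)) (h : ∀ s ∈ sets, s.Nodup) :
    (sets.map (fun s => (s.length : Int))).sum - 2 * pairSum sets
      = ∑ x ∈ sets.flatten.toFinset,
          ((sets.flatten.count x : Int) * (2 - (sets.flatten.count x : Int))) := by
  induction sets with
  | nil => simp [pairSum]
  | cons s rest ih =>
    have hs : s.Nodup := h s (by simp)
    have hrest : ∀ t ∈ rest, t.Nodup := fun t ht => h t (by simp [ht])
    rw [List.flatten_cons, step_sum s rest.flatten hs, inter_sum s rest hs hrest,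
      ← ih hrest]
    simp only [List.map_cons, List.sum_cons, pairSum]
    ring

theorem inclusion_exclusion_part3_spec : Claim_equal_inclusion_exclusion_part3 := by
  intro sets _hdom hpre
  unfold Spec_inclusion_exclusion_part3
  rw [a_closed, b_closed, ofList_sum_eq_finset]
  exact core sets hpre
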